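-- pv_equiv track=rewrite | github.com/ArturRy/Tests_DZ | Tests_dz/main.py | supernames
-- ===== SOURCE A (Python) =====
-- def supernames(mentors, courses):
--     mentors_names = []
--     for m in mentors:
--         course_names = []
--         for name in m:
--             course_names.append(name.split()[0])
--         mentors_names.append(course_names)
--
--     pairs = []
--
--     for id1 in range(len(mentors_names)):
--         for id2 in range(len(mentors_names)):
--             if id1 == id2: continue
--
--             intersection_set = set(mentors_names[id1]) & set(mentors_names[id2])
--             if len(intersection_set) > 0:
--
--                 pair = {courses[id1], courses[id2]}
--
--                 if pair not in pairs:
--                     pairs.append(pair)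
--
--                     all_names_sorted = sorted(intersection_set)
--
--                     res = (f"На курсах '{courses[id1]}' и '{courses[id2]}' преподают: {', '.join(all_names_sorted)}")
--                     return res
-- ===== SOURCE B (Python) =====
-- def supernames(mentors, courses):
--     # One left-to-right pass: remember each first name's earliest course index,
--     # track the lexicographically smallest (earlier, current) index pair.
--     first_seen = {}
--     best = None
--     for i, m in enumerate(mentors):
--         for fn in dict.fromkeys(name.split()[0] for name in m):
--             if fn in first_seen:
--                 cand = (first_seen[fn], i)
--                 if best is None or cand < best:
--                     best = cand
--             else:
--                 first_seen[fn] = i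
--     if best is None:
--         return None
--     i, j = best
--     fi = {name.split()[0] for name in mentors[i]}
--     fj = {name.split()[0] for name in mentors[j]}
--     shared = sorted(fi & fj)
--     return f"На курсах '{courses[i]}' и '{courses[j]}' преподают: {', '.join(shared)}"
-- ===== Notes on version B (the rewrite author's own statement) =====
-- stated objective: alternative
-- what changed: A scans all ordered index pairs, building two sets and intersecting them per pair, returning on the first hit; B makes a single left-to-right pass with a first-seen dict per mentor first name, maintaining the running lex-min (earlier, current) index pair, and builds the intersection only for the winning pair.
import Mathlib
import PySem

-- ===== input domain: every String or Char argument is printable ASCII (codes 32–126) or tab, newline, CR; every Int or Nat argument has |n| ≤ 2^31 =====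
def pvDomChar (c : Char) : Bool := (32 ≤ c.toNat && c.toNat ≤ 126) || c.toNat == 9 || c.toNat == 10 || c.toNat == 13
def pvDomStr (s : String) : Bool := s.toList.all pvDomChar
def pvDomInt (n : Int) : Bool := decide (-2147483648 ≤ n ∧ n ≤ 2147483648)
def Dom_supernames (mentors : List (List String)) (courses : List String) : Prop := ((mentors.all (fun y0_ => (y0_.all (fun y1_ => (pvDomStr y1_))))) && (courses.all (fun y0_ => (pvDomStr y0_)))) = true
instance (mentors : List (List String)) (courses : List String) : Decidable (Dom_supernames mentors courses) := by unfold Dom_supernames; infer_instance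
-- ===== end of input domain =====

-- B replaces A's all-pairs set-intersection scan by a single pass with a first-seen
-- dict keeping a running lex-min index pair (a different algorithm; not measured faster).

-- ===== PORT A =====
-- name.split()[0]; the IndexError on whitespace-only names is excluded by Pre_ (.getD "" there)
def pvFirstW (s : String) : String := (PySem.List.pyGet? (PySem.Str.split₀ s) 0).getD ""

-- set(mentors_names[id1]) & set(mentors_names[id2]); ids come from range(len), always in range
def pvInterAt (mn : List (List String)) (i j : Int) : PySem.Set String :=
  PySem.Set.inter (PySem.Set.ofList (PySem.List.pyGetD mn i []))
                  (PySem.Set.ofList (PySem.List.pyGetD mn j []))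

-- inner 'for id2 in range(...)' loop of A, threading the 'pairs' accumulator;
-- courses[...] via pyGetD: the IndexError when the winning pair reaches past courses is excluded by Pre_
def pvAInner (mn : List (List String)) (courses : List String) (id1 : Int) :
    List Int → List (PySem.Set String) → List (PySem.Set String) × Option String
  | [], pairs => (pairs, none)
  | id2 :: rest, pairs =>
    if id1 = id2 then pvAInner mn courses id1 rest pairs
    else
      if 0 < PySem.Set.len (pvInterAt mn id1 id2) then
        let pair : PySem.Set String :=
          PySem.Set.add (PySem.Set.add PySem.Set.empty (PySem.List.pyGetD courses id1 ""))
            (PySem.List.pyGetD courses id2 "")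
        if pairs.any (fun p => PySem.Set.equal p pair) then
          pvAInner mn courses id1 rest pairs
        else
          (pairs ++ [pair],
           some ("На курсах '" ++ PySem.List.pyGetD courses id1 "" ++ "' и '" ++
                 PySem.List.pyGetD courses id2 "" ++ "' преподают: " ++
                 PySem.Str.join ", " (PySem.List.sorted (pvInterAt mn id1 id2) (fun x => x) false)))
      else pvAInner mn courses id1 rest pairs

-- outer 'for id1 in range(...)' loop of A
def pvAOuter (mn : List (List String)) (courses : List String) :
    List Int → List (PySem.Set String) → Option String
  | [], _ => none
  | id1 :: rest, pairs =>
    match pvAInner mn courses id1 (PySem.List.pyRange 0 (PySem.List.len mn) 1) pairs with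
    | (_, some r) => some r
    | (pairs', none) => pvAOuter mn courses rest pairs'

def supernames (mentors : List (List String)) (courses : List String) : Option String :=
  let mn := mentors.foldl (fun acc m => acc ++ [m.foldl (fun cn name => cn ++ [pvFirstW name]) []]) []
  pvAOuter mn courses (PySem.List.pyRange 0 (PySem.List.len mn) 1) []

-- ===== PORT B =====
-- Python tuple '<' on the (int, int) candidate pairs
def pvPairLt (a b : Int × Int) : Bool := a.1 < b.1 || (a.1 == b.1 && a.2 < b.2)

-- body of B's inner 'for fn in dict.fromkeys(...)' loop
def pvBStep (i : Int) (st : PySem.Dict String Int × Option (Int × Int)) (fn : String) :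
    PySem.Dict String Int × Option (Int × Int) :=
  match st.1.get? fn with
  | some a =>
    match st.2 with
    | none => (st.1, some (a, i))
    | some b => if pvPairLt (a, i) b then (st.1, some (a, i)) else st
  | none => (st.1.insert fn i, st.2)

-- one group of B's outer 'for i, m in enumerate(mentors)' loop
def pvBGroup (st : PySem.Dict String Int × Option (Int × Int)) (p : Int × List String) :
    PySem.Dict String Int × Option (Int × Int) :=
  (PySem.List.dedup (p.2.map pvFirstW)).foldl (pvBStep p.1) st

def supernames_alt (mentors : List (List String)) (courses : List String) : Option String :=
  let st := (PySem.List.enumerate mentors 0).foldl pvBGroup (PySem.Dict.empty, none)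
  match st.2 with
  | none => none
  | some (i, j) =>
    let fi := PySem.Set.ofList ((PySem.List.pyGetD mentors i []).map pvFirstW)
    let fj := PySem.Set.ofList ((PySem.List.pyGetD mentors j []).map pvFirstW)
    some ("На курсах '" ++ PySem.List.pyGetD courses i "" ++ "' и '" ++
          PySem.List.pyGetD courses j "" ++ "' преподают: " ++
          PySem.Str.join ", " (PySem.List.sorted (PySem.Set.inter fi fj) (fun x => x) false))

-- ===== PRECONDITION & SPEC =====
-- two distinct course indices share a mentor first name (helper for Pre_ only)
def pvShN (mentors : List (List String)) (i j : Nat) : Prop :=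
  ∃ fn ∈ (mentors.getD i []).map pvFirstW, fn ∈ (mentors.getD j []).map pvFirstW

-- Pre_ excludes exactly the inputs on which Python A raises IndexError: a whitespace-only
-- mentor name (name.split()[0]), or — when some two courses share a mentor first name —
-- a courses list too short for the winning (lex-least) sharing index pair, where A
-- evaluates courses[id1]/courses[id2]; on every other input A returns a value.
def Pre_supernames (mentors : List (List String)) (courses : List String) : Prop :=
  (∀ m ∈ mentors, ∀ name ∈ m, PySem.Str.split₀ name ≠ []) ∧
  (∀ i ∈ List.range mentors.length, ∀ j ∈ List.range mentors.length, i < j → pvShN mentors i j →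
    (∀ i' ∈ List.range mentors.length, ∀ j' ∈ List.range mentors.length, i' < j' → pvShN mentors i' j' →
      (i < i' ∨ (i = i' ∧ j ≤ j'))) →
    j < courses.length)
instance (mentors : List (List String)) (courses : List String) : Decidable (Pre_supernames mentors courses) := by unfold Pre_supernames pvShN; infer_instance

def pvWitness_supernames : List (List String) × List String :=
  ([["Ann Smith", "Bob Jones"], ["Ann Brown"]], ["python", "java"])

def Spec_supernames (mentors : List (List String)) (courses : List String) (out : Option String) : Prop := out = supernames_alt mentors courses
instance (mentors : List (List String)) (courses : List String) (out : Option String) : Decidable (Spec_supernames mentors courses out) := by unfold Spec_supernames; infer_instance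

-- ===== CLAIM (what is proved, stated in full; the proofs are below) =====
def Claim_equal_supernames : Prop := ∀ (mentors : List (List String)) (courses : List String), Dom_supernames mentors courses → Pre_supernames mentors courses → Spec_supernames mentors courses (supernames mentors courses)

-- ===== LEMMAS AND PROOFS =====

def pvF (mentors : List (List String)) : List (List String) := mentors.map (fun m => m.map pvFirstW)
def pvSh (mn : List (List String)) (i j : Int) : Prop :=
  ∃ fn, fn ∈ PySem.List.pyGetD mn i [] ∧ fn ∈ PySem.List.pyGetD mn j []
def pvLexLe (p q : Int × Int) : Prop := p.1 < q.1 ∨ (p.1 = q.1 ∧ p.2 ≤ q.2)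
def pvInS (mn : List (List String)) (t : Int) (p : Int × Int) : Prop :=
  0 ≤ p.1 ∧ p.1 < p.2 ∧ p.2 < t ∧ pvSh mn p.1 p.2
def pvIsMin (P : Int × Int → Prop) (b : Option (Int × Int)) : Prop :=
  (b = none → ∀ p, ¬ P p) ∧ ∀ q, b = some q → P q ∧ ∀ p, P p → pvLexLe q p

theorem pvShb_iff (mn : List (List String)) (i j : Int) :
    (0 < PySem.Set.len (pvInterAt mn i j)) ↔ pvSh mn i j := by
  simp [pvInterAt, pvSh, pysem, List.length_pos_iff, List.eq_nil_iff_forall_not_mem]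

theorem pvSh_symm {mn : List (List String)} {i j : Int} (h : pvSh mn i j) : pvSh mn j i := by
  obtain ⟨fn, h1, h2⟩ := h; exact ⟨fn, h2, h1⟩

def pvStrA (mn : List (List String)) (courses : List String) (i j : Int) : String :=
  "На курсах '" ++ PySem.List.pyGetD courses i "" ++ "' и '" ++
  PySem.List.pyGetD courses j "" ++ "' преподают: " ++
  PySem.Str.join ", " (PySem.List.sorted (pvInterAt mn i j) (fun x => x) false)

def pvPredA (mn : List (List String)) (i : Int) (j : Int) : Bool :=
  (!(i == j)) && decide (0 < PySem.Set.len (pvInterAt mn i j))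

def pvAPair (mn : List (List String)) : Option (Int × Int) :=
  (PySem.List.pyRange 0 (PySem.List.len mn) 1).findSome? (fun i =>
    ((PySem.List.pyRange 0 (PySem.List.len mn) 1).find? (pvPredA mn i)).map (fun j => (i, j)))

-- inner loop with empty pairs = find? over the id2 list
theorem pvAInner_eq (mn : List (List String)) (courses : List String) (id1 : Int) (l : List Int) :
    pvAInner mn courses id1 l [] =
      match l.find? (pvPredA mn id1) with
      | none => ([], none)
      | some id2 => ([PySem.Set.add (PySem.Set.add PySem.Set.empty (PySem.List.pyGetD courses id1 ""))
            (PySem.List.pyGetD courses id2 "")], some (pvStrA mn courses id1 id2)) := by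
  induction l with
  | nil => simp [pvAInner]
  | cons id2 rest ih =>
    by_cases h : id1 = id2
    · subst h; simpa [pvAInner, List.find?, pvPredA] using ih
    · have hb : (id1 == id2) = false := by simp [h]
      by_cases hsh : 0 < (pvInterAt mn id1 id2).length
      · simp [pvAInner, h, hb, hsh, PySem.Set.len, List.find?, pvPredA, pvStrA]
      · simp [pvAInner, h, hb, hsh, PySem.Set.len, List.find?, pvPredA, ih]

theorem pvFindSome?_map_comp {α β γ : Type} (l : List α) (f : α → Option β) (g : β → γ) :
    l.findSome? (fun x => (f x).map g) = (l.findSome? f).map g := by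
  induction l with
  | nil => rfl
  | cons x rest ih =>
    cases h : f x with
    | none => simp [List.findSome?_cons, h, ih]
    | some b => simp [List.findSome?_cons, h]

theorem pvAOuter_eq (mn : List (List String)) (courses : List String) (l : List Int) :
    pvAOuter mn courses l [] =
      l.findSome? (fun i =>
        ((PySem.List.pyRange 0 (PySem.List.len mn) 1).find? (pvPredA mn i)).map
          (fun j => pvStrA mn courses i j)) := by
  induction l with
  | nil => rfl
  | cons id1 rest ih =>
    rw [pvAOuter, pvAInner_eq, List.findSome?_cons]
    cases h : (PySem.List.pyRange 0 (PySem.List.len mn) 1).find? (pvPredA mn id1) with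
    | none => simp only [h, Option.map_none]; exact ih
    | some id2 => simp only [h, Option.map_some]

-- outer loop = findSome? of the pair finder, rendered
theorem pvA_eq_pair (mn : List (List String)) (courses : List String) :
    pvAOuter mn courses (PySem.List.pyRange 0 (PySem.List.len mn) 1) [] =
      (pvAPair mn).map (fun p => pvStrA mn courses p.1 p.2) := by
  rw [pvAOuter_eq, pvAPair, ← pvFindSome?_map_comp]
  have hmm : ∀ (i : Int),
      (Option.map (fun j => (i, j)) ((PySem.List.pyRange 0 (PySem.List.len mn) 1).find? (pvPredA mn i))).map
        (fun p : Int × Int => pvStrA mn courses p.1 p.2)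
      = ((PySem.List.pyRange 0 (PySem.List.len mn) 1).find? (pvPredA mn i)).map (fun j => pvStrA mn courses i j) := by
    intro i; rw [Option.map_map]; rfl
  simp only [hmm]

theorem pvPredA_iff (mn : List (List String)) (i j : Int) :
    pvPredA mn i j = true ↔ i ≠ j ∧ pvSh mn i j := by
  rw [pvPredA, Bool.and_eq_true, decide_eq_true_iff, pvShb_iff]
  simp [Bool.not_eq_true', beq_eq_false_iff_ne]

theorem pvFind?_pyRange_spec {a b : Int} {p : Int → Bool} {j : Int}
    (h : (PySem.List.pyRange a b 1).find? p = some j) :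
    a ≤ j ∧ j < b ∧ p j = true ∧ ∀ x, a ≤ x → x < b → p x = true → j ≤ x := by
  have hmem := List.mem_of_find?_eq_some h
  rw [PySem.List.mem_pyRange_one] at hmem
  have hp := List.find?_some h
  refine ⟨hmem.1, hmem.2, hp, ?_⟩
  rw [List.find?_eq_some_iff_append] at h
  obtain ⟨-, as, bs, heq, hfail⟩ := h
  intro x hax hxb hpx
  have hxmem : x ∈ PySem.List.pyRange a b 1 := (PySem.List.mem_pyRange_one).mpr ⟨hax, hxb⟩
  rw [heq] at hxmem
  rcases List.mem_append.mp hxmem with hx | hx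
  · exact absurd hpx (by simpa using hfail x hx)
  · rcases List.mem_cons.mp hx with rfl | hx
    · exact le_refl _
    · have hpw := PySem.List.pairwise_lt_pyRange_one a b
      rw [heq] at hpw
      have := (List.pairwise_append.mp hpw).2.1
      exact le_of_lt ((List.pairwise_cons.mp this).1 x hx)

theorem pvA_suffix (mn : List (List String)) (k : Int) (h0 : 0 ≤ k) (hk : k ≤ (mn.length : Int))
    (hinv : ∀ i, 0 ≤ i → i < k → ∀ j, 0 ≤ j → j < (mn.length : Int) → i ≠ j → ¬ pvSh mn i j) :
    pvIsMin (pvInS mn (mn.length : Int))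
      ((PySem.List.pyRange k (PySem.List.len mn) 1).findSome? (fun i =>
        ((PySem.List.pyRange 0 (PySem.List.len mn) 1).find? (pvPredA mn i)).map (fun j => (i, j)))) := by
  have hlen : PySem.List.len mn = (mn.length : Int) := by simp [pysem]
  rw [hlen] at *
  induction hm : ((mn.length : Int) - k).toNat generalizing k with
  | zero =>
    have : (mn.length : Int) ≤ k := by omega
    rw [PySem.List.pyRange_one_eq_nil this]
    refine ⟨fun _ p hp => ?_, by simp⟩
    obtain ⟨h1, h2, h3, hsh⟩ := hp
    have hne : p.1 ≠ p.2 := by omega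
    exact hinv p.1 h1 (by omega) p.2 (by omega) h3 hne hsh
  | succ m ih =>
    have hklt : k < (mn.length : Int) := by omega
    rw [PySem.List.pyRange_one_cons hklt, List.findSome?_cons]
    cases h : (PySem.List.pyRange 0 (mn.length : Int) 1).find? (pvPredA mn k) with
    | none =>
      rw [List.find?_eq_none] at h
      simp only [Option.map_none]
      refine ih (k + 1) (by omega) (by omega) ?_ (by omega)
      intro i hi0 hik j hj0 hjn hij
      by_cases hik' : i < k
      · exact hinv i hi0 hik' j hj0 hjn hij
      · have : i = k := by omega
        subst this
        have hjm : j ∈ PySem.List.pyRange 0 (mn.length : Int) 1 := (PySem.List.mem_pyRange_one).mpr ⟨hj0, hjn⟩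
        have := h j hjm
        rw [pvPredA_iff] at this
        tauto
    | some j =>
      simp only [Option.map_some]
      obtain ⟨hj0, hjn, hpj, hmin⟩ := pvFind?_pyRange_spec h
      rw [pvPredA_iff] at hpj
      obtain ⟨hkj, hsh⟩ := hpj
      have hkltj : k < j := by
        rcases lt_or_gt_of_ne hkj with h' | h'
        · exact h'
        · exact absurd (pvSh_symm hsh) (hinv j hj0 h' k h0 hklt (by omega))
      refine ⟨by simp, fun q hq => ?_⟩
      cases hq
      refine ⟨⟨h0, hkltj, hjn, hsh⟩, ?_⟩
      rintro ⟨a, b⟩ ⟨ha0, hab, hbn, hshab⟩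
      have hka : k ≤ a := by
        by_contra hlt
        exact hinv a ha0 (by omega) b (by omega) hbn (by omega) hshab
      rcases eq_or_lt_of_le hka with rfl | hlt
      · exact Or.inr ⟨rfl, hmin b (by omega) hbn (by rw [pvPredA_iff]; exact ⟨by omega, hshab⟩)⟩
      · exact Or.inl hlt

theorem pvA_isMin (mn : List (List String)) :
    pvIsMin (pvInS mn (mn.length : Int)) (pvAPair mn) := by
  have h := pvA_suffix mn 0 (le_refl _) (by positivity)
    (fun i h1 h2 => absurd (h1.trans_lt h2) (lt_irrefl 0))
  rw [pvAPair]
  simpa [pysem] using h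

theorem pvLexLe_antisymm {p q : Int × Int} (h : pvLexLe p q) (h' : pvLexLe q p) : p = q := by
  obtain ⟨a, b⟩ := p; obtain ⟨c, d⟩ := q
  simp [pvLexLe] at *; omega

theorem pvLexLe_trans {p q r : Int × Int} (h : pvLexLe p q) (h' : pvLexLe q r) : pvLexLe p r := by
  obtain ⟨a, b⟩ := p; obtain ⟨c, d⟩ := q; obtain ⟨e, f⟩ := r
  simp [pvLexLe] at *; omega

theorem pvLexLe_refl (p : Int × Int) : pvLexLe p p := Or.inr ⟨rfl, le_refl _⟩

theorem pvPairLt_le {c q : Int × Int} (h : pvPairLt c q = true) : pvLexLe c q := by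
  obtain ⟨a, b⟩ := c; obtain ⟨e, f⟩ := q; simp [pvPairLt] at h; simp [pvLexLe]; omega

theorem pvPairLt_not_le {c q : Int × Int} (h : ¬ pvPairLt c q = true) : pvLexLe q c := by
  obtain ⟨a, b⟩ := c; obtain ⟨e, f⟩ := q; simp [pvPairLt] at h; simp [pvLexLe]; omega

theorem pvIsMin_unique {P : Int × Int → Prop} {b b' : Option (Int × Int)}
    (h : pvIsMin P b) (h' : pvIsMin P b') : b = b' := by
  obtain ⟨hn, hs⟩ := h; obtain ⟨hn', hs'⟩ := h'
  cases b with
  | none => cases b' with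
    | none => rfl
    | some q' => exact absurd ((hs' q' rfl).1) (hn rfl q')
  | some q => cases b' with
    | none => exact absurd ((hs q rfl).1) (hn' rfl q)
    | some q' =>
      have h1 := hs q rfl; have h2 := hs' q' rfl
      exact congrArg some (pvLexLe_antisymm (h1.2 q' h2.1) (h2.2 q h1.1))

-- min update as Python's 'if best is None or cand < best'
def pvUpd (b : Option (Int × Int)) (c : Int × Int) : Option (Int × Int) :=
  match b with
  | none => some c
  | some q => if pvPairLt c q then some c else some q

-- min-update step lemma
theorem pvIsMin_update {P : Int × Int → Prop} {b : Option (Int × Int)} (c : Int × Int)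
    (h : pvIsMin P b) :
    pvIsMin (fun p => P p ∨ p = c) (pvUpd b c) := by
  rw [pvUpd.eq_def]
  obtain ⟨hn, hs⟩ := h
  cases b with
  | none =>
    refine ⟨by simp, fun q hq => ?_⟩
    simp at hq; subst hq
    refine ⟨Or.inr rfl, ?_⟩
    rintro p (hp | rfl)
    · exact absurd hp (hn rfl p)
    · exact pvLexLe_refl _
  | some q =>
    have h1 := hs q rfl
    by_cases hlt : pvPairLt c q = true
    · simp only [hlt, if_true]
      refine ⟨by simp, fun q' hq' => ?_⟩
      simp at hq'; subst hq'
      refine ⟨Or.inr rfl, ?_⟩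
      rintro p (hp | rfl)
      · exact pvLexLe_trans (pvPairLt_le hlt) (h1.2 p hp)
      · exact pvLexLe_refl _
    · simp only [hlt, Bool.false_eq_true, if_false]
      refine ⟨by simp, fun q' hq' => ?_⟩
      simp at hq'; subst hq'
      refine ⟨Or.inl h1.1, ?_⟩
      rintro p (hp | rfl)
      · exact h1.2 p hp
      · exact pvPairLt_not_le hlt
-- subset/cofinal transfer
theorem pvIsMin_mono {P Q : Int × Int → Prop} {b : Option (Int × Int)}
    (h : pvIsMin P b) (hPQ : ∀ p, P p → Q p) (hQP : ∀ p, Q p → ∃ c, P c ∧ pvLexLe c p) :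
    pvIsMin Q b := by
  obtain ⟨hn, hs⟩ := h
  refine ⟨fun hb p hp => ?_, fun q hq => ?_⟩
  · obtain ⟨c, hc, _⟩ := hQP p hp; exact hn hb c hc
  · have h1 := hs q hq
    refine ⟨hPQ q h1.1, fun p hp => ?_⟩
    obtain ⟨c, hc, hle⟩ := hQP p hp
    exact pvLexLe_trans (h1.2 c hc) hle

-- ===== B-side invariant =====

-- fn's earliest position in pre's first-name table
def pvFirstOcc (pre : List (List String)) (fn : String) (a : Int) : Prop :=
  0 ≤ a ∧ a < (pre.length : Int) ∧ fn ∈ PySem.List.pyGetD (pvF pre) a [] ∧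
    ∀ a', 0 ≤ a' → a' < a → fn ∉ PySem.List.pyGetD (pvF pre) a' []

def pvInv (pre : List (List String)) (st : PySem.Dict String Int × Option (Int × Int)) : Prop :=
  (∀ fn a, st.1.get? fn = some a ↔ pvFirstOcc pre fn a) ∧
  pvIsMin (pvInS (pvF pre) (pre.length : Int)) st.2

-- getD row access of pvF
theorem pvRow (pre : List (List String)) (a : Int) (h0 : 0 ≤ a) (ha : a < (pre.length : Int)) :
    PySem.List.pyGetD (pvF pre) a [] = (pre[a.toNat]'(by omega)).map pvFirstW := by
  rw [PySem.List.pyGetD_eq_getElem (pvF pre) [] h0 (by simp [pvF]; omega)]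
  simp [pvF]

theorem pvRow_append_lt (pre : List (List String)) (m : List String) (a : Int)
    (h0 : 0 ≤ a) (ha : a < (pre.length : Int)) :
    PySem.List.pyGetD (pvF (pre ++ [m])) a [] = PySem.List.pyGetD (pvF pre) a [] := by
  rw [pvRow pre a h0 ha, pvRow (pre ++ [m]) a h0 (by simp; omega)]
  congr 1
  exact List.getElem_append_left (by omega)

theorem pvRow_append_self (pre : List (List String)) (m : List String) :
    PySem.List.pyGetD (pvF (pre ++ [m])) (pre.length : Int) [] = m.map pvFirstW := by
  rw [pvRow (pre ++ [m]) (pre.length : Int) (by positivity) (by simp)]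
  congr 1
  simp

theorem pvFirstOcc_unique {pre : List (List String)} {fn : String} {a a' : Int}
    (h : pvFirstOcc pre fn a) (h' : pvFirstOcc pre fn a') : a = a' := by
  obtain ⟨h1, h2, h3, h4⟩ := h; obtain ⟨h1', h2', h3', h4'⟩ := h'
  by_contra hne
  rcases lt_or_gt_of_ne hne with hlt | hlt
  · exact h4' a h1 hlt h3
  · exact h4 a' h1' hlt h3'

-- existence of a first occurrence below any occurrence
theorem pvFirstOcc_exists {pre : List (List String)} {fn : String} {a : Int}
    (h0 : 0 ≤ a) (ha : a < (pre.length : Int)) (h : fn ∈ PySem.List.pyGetD (pvF pre) a []) :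
    ∃ a0, pvFirstOcc pre fn a0 ∧ a0 ≤ a := by
  have hP : fn ∈ PySem.List.pyGetD (pvF pre) (a.toNat : Int) [] := by
    rwa [show ((a.toNat : Int)) = a by omega]
  classical
  let P : Nat → Prop := fun k => fn ∈ PySem.List.pyGetD (pvF pre) (k : Int) []
  have hex : ∃ k, P k := ⟨a.toNat, hP⟩
  refine ⟨(Nat.find hex : Nat), ⟨by positivity, ?_, ?_, ?_⟩, ?_⟩
  · have hle : Nat.find hex ≤ a.toNat := Nat.find_min' hex hP
    omega
  · exact Nat.find_spec hex
  · intro a' h0' hlt hmem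
    have : P a'.toNat := by
      show fn ∈ PySem.List.pyGetD (pvF pre) ((a'.toNat : Nat) : Int) []
      rwa [show ((a'.toNat : Int)) = a' by omega]
    have := Nat.find_min' hex this
    omega
  · have := Nat.find_min' hex hP
    omega

-- pvFirstOcc is stable under appending a row
theorem pvFirstOcc_append_iff (pre : List (List String)) (m : List String) (fn : String) (a : Int) :
    pvFirstOcc (pre ++ [m]) fn a ↔
      (pvFirstOcc pre fn a ∨ ((¬ ∃ a', pvFirstOcc pre fn a') ∧ fn ∈ m.map pvFirstW ∧ a = (pre.length : Int))) := by
  have hlen : ((pre ++ [m]).length : Int) = (pre.length : Int) + 1 := by simp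
  constructor
  · rintro ⟨h0, h2, h3, h4⟩
    rw [hlen] at h2
    by_cases hat : a < (pre.length : Int)
    · left
      rw [pvRow_append_lt pre m a h0 hat] at h3
      refine ⟨h0, hat, h3, fun a' h0' hlt hmem => ?_⟩
      exact h4 a' h0' hlt (by rwa [pvRow_append_lt pre m a' h0' (by omega)])
    · have hae : a = (pre.length : Int) := by omega
      subst hae
      rw [pvRow_append_self] at h3
      refine Or.inr ⟨?_, h3, rfl⟩
      rintro ⟨a0, ha0⟩
      obtain ⟨g0, g2, g3, -⟩ := ha0
      exact h4 a0 g0 g2 (by rwa [pvRow_append_lt pre m a0 g0 g2])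
  · rintro (⟨h0, h2, h3, h4⟩ | ⟨hnex, hmem, rfl⟩)
    · refine ⟨h0, by rw [hlen]; omega, by rwa [pvRow_append_lt pre m a h0 h2], ?_⟩
      intro a' h0' hlt hmem
      exact h4 a' h0' hlt (by rwa [pvRow_append_lt pre m a' h0' (by omega)] at hmem)
    · refine ⟨by positivity, by rw [hlen]; omega, by rwa [pvRow_append_self], ?_⟩
      intro a' h0' hlt hmem
      rw [pvRow_append_lt pre m a' h0' hlt] at hmem
      obtain ⟨a0, ha0, -⟩ := pvFirstOcc_exists h0' hlt hmem
      exact hnex ⟨a0, ha0⟩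

-- dict state during the inner loop
def pvIDict (pre : List (List String)) (done : List String) (d : PySem.Dict String Int) : Prop :=
  ∀ fn a, d.get? fn = some a ↔
    (pvFirstOcc pre fn a ∨ (fn ∈ done ∧ (¬ ∃ a', pvFirstOcc pre fn a') ∧ a = (pre.length : Int)))

-- candidate set during the inner loop
def pvQ (pre : List (List String)) (done : List String) (p : Int × Int) : Prop :=
  pvInS (pvF pre) (pre.length : Int) p ∨
    ∃ fn ∈ done, pvFirstOcc pre fn p.1 ∧ p.2 = (pre.length : Int)

theorem pvIsMin_iff {P Q : Int × Int → Prop} {b : Option (Int × Int)}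
    (hiff : ∀ p, P p ↔ Q p) (h : pvIsMin P b) : pvIsMin Q b :=
  pvIsMin_mono h (fun p hp => (hiff p).mp hp) (fun p hp => ⟨p, (hiff p).mpr hp, pvLexLe_refl p⟩)

theorem pvInner_fold (pre : List (List String)) (todo done : List String)
    (d : PySem.Dict String Int) (b : Option (Int × Int))
    (hnd : ∀ fn ∈ todo, fn ∉ done) (hnodup : todo.Nodup)
    (hd : pvIDict pre done d) (hb : pvIsMin (pvQ pre done) b) :
    pvIDict pre (done ++ todo) (todo.foldl (pvBStep (pre.length : Int)) (d, b)).1 ∧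
    pvIsMin (pvQ pre (done ++ todo)) (todo.foldl (pvBStep (pre.length : Int)) (d, b)).2 := by
  induction todo generalizing done d b with
  | nil => simpa using ⟨hd, hb⟩
  | cons x todo' ih =>
    have hxdone : x ∉ done := hnd x List.mem_cons_self
    have hnd' : ∀ fn ∈ todo', fn ∉ done ++ [x] := by
      intro fn hfn
      simp only [List.mem_append, List.mem_singleton]
      push Not
      exact ⟨hnd fn (List.mem_cons_of_mem x hfn), fun he => (List.nodup_cons.mp hnodup).1 (he ▸ hfn)⟩
    have hnodup' : todo'.Nodup := (List.nodup_cons.mp hnodup).2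
    rw [List.foldl_cons]
    have key : pvIDict pre (done ++ [x]) (pvBStep (pre.length : Int) (d, b) x).1 ∧
        pvIsMin (pvQ pre (done ++ [x])) (pvBStep (pre.length : Int) (d, b) x).2 := by
      cases ha : d.get? x with
      | some a =>
        have hFO : pvFirstOcc pre x a := by
          rcases (hd x a).mp ha with h | h
          · exact h
          · exact absurd h.1 hxdone
        constructor
        · -- dict unchanged
          have hfst : (pvBStep (pre.length : Int) (d, b) x).1 = d := by
            simp only [pvBStep, ha]
            cases b with
            | none => rfl
            | some q => by_cases hq : pvPairLt (a, (pre.length : Int)) q <;> simp [hq]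
          rw [hfst]
          intro fn a'
          rw [hd fn a']
          constructor
          · rintro (h | h)
            · exact Or.inl h
            · exact Or.inr ⟨List.mem_append_left _ h.1, h.2⟩
          · rintro (h | ⟨hmem, hnex, ht⟩)
            · exact Or.inl h
            · rcases List.mem_append.mp hmem with hmem | hmem
              · exact Or.inr ⟨hmem, hnex, ht⟩
              · rw [List.mem_singleton] at hmem
                subst hmem
                exact absurd ⟨a, hFO⟩ hnex
        · -- best updated with candidate (a, t)
          have hsnd : (pvBStep (pre.length : Int) (d, b) x).2 =
              pvUpd b (a, (pre.length : Int)) := by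
            simp only [pvBStep, ha, pvUpd]
            cases b with
            | none => rfl
            | some q => by_cases hq : pvPairLt (a, (pre.length : Int)) q <;> simp [hq]
          rw [hsnd]
          refine pvIsMin_iff ?_ (pvIsMin_update (a, (pre.length : Int)) hb)
          intro p
          constructor
          · rintro (h | rfl)
            · rcases h with h | ⟨fn, hfn, hp⟩
              · exact Or.inl h
              · exact Or.inr ⟨fn, List.mem_append_left _ hfn, hp⟩
            · exact Or.inr ⟨x, List.mem_append_right _ (List.mem_singleton.mpr rfl), hFO, rfl⟩
          · rintro (h | ⟨fn, hfn, hp1, hp2⟩)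
            · exact Or.inl (Or.inl h)
            · rcases List.mem_append.mp hfn with hfn | hfn
              · exact Or.inl (Or.inr ⟨fn, hfn, hp1, hp2⟩)
              · rw [List.mem_singleton] at hfn
                subst hfn
                have : p.1 = a := pvFirstOcc_unique hp1 hFO
                right
                obtain ⟨p1, p2⟩ := p
                simp only at this hp2
                rw [this, hp2]
      | none =>
        have hnex : ¬ ∃ a0, pvFirstOcc pre x a0 := by
          rintro ⟨a0, ha0⟩
          have hra : d.get? x = some a0 := (hd x a0).mpr (Or.inl ha0)
          rw [ha] at hra
          cases hra
        have hstep : pvBStep (pre.length : Int) (d, b) x = (d.insert x (pre.length : Int), b) := by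
          simp only [pvBStep, ha]
        rw [hstep]
        constructor
        · intro fn a'
          rw [PySem.Dict.get?_insert]
          by_cases hfx : fn = x
          · subst hfx
            rw [if_pos rfl]
            constructor
            · rintro h
              rw [Option.some_inj] at h
              exact Or.inr ⟨List.mem_append_right _ (List.mem_singleton.mpr rfl), hnex, h.symm⟩
            · rintro (h | ⟨-, -, ht⟩)
              · exact absurd ⟨a', h⟩ hnex
              · rw [ht]
          · simp only [if_neg hfx]
            rw [hd fn a']
            constructor
            · rintro (h | h)
              · exact Or.inl h
              · exact Or.inr ⟨List.mem_append_left _ h.1, h.2⟩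
            · rintro (h | ⟨hmem, hnex', ht⟩)
              · exact Or.inl h
              · rcases List.mem_append.mp hmem with hmem | hmem
                · exact Or.inr ⟨hmem, hnex', ht⟩
                · exact absurd (List.mem_singleton.mp hmem) hfx
        · refine pvIsMin_iff ?_ hb
          intro p
          constructor
          · rintro (h | ⟨fn, hfn, hp⟩)
            · exact Or.inl h
            · exact Or.inr ⟨fn, List.mem_append_left _ hfn, hp⟩
          · rintro (h | ⟨fn, hfn, hp1, hp2⟩)
            · exact Or.inl h
            · rcases List.mem_append.mp hfn with hfn | hfn
              · exact Or.inr ⟨fn, hfn, hp1, hp2⟩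
              · rw [List.mem_singleton] at hfn
                subst hfn
                exact absurd ⟨p.1, hp1⟩ hnex
    have := ih (done ++ [x]) (pvBStep (pre.length : Int) (d, b) x).1 (pvBStep (pre.length : Int) (d, b) x).2
      hnd' hnodup' key.1 key.2
    rw [List.append_assoc] at this
    simpa using this

theorem pvGroup_step (pre : List (List String)) (m : List String)
    (st : PySem.Dict String Int × Option (Int × Int)) (h : pvInv pre st) :
    pvInv (pre ++ [m]) (pvBGroup st ((pre.length : Int), m)) := by
  obtain ⟨hdict, hbest⟩ := h
  have hd0 : pvIDict pre [] st.1 := by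
    intro fn a
    rw [hdict fn a]
    simp
  have hb0 : pvIsMin (pvQ pre []) st.2 := by
    refine pvIsMin_iff ?_ hbest
    intro p
    simp [pvQ]
  have hmain := pvInner_fold pre (PySem.List.dedup (m.map pvFirstW)) [] st.1 st.2
    (by simp) (PySem.List.nodup_dedup _) hd0 hb0
  rw [List.nil_append] at hmain
  have hBG : pvBGroup st ((pre.length : Int), m) =
      (PySem.List.dedup (m.map pvFirstW)).foldl (pvBStep (pre.length : Int)) (st.1, st.2) := by
    rw [pvBGroup]
  constructor
  · intro fn a
    rw [hBG, hmain.1 fn a, pvFirstOcc_append_iff]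
    rw [PySem.List.mem_dedup]
    constructor
    · rintro (h | ⟨hfn, hnex, ht⟩)
      · exact Or.inl h
      · exact Or.inr ⟨hnex, hfn, ht⟩
    · rintro (h | ⟨hnex, hfn, ht⟩)
      · exact Or.inl h
      · exact Or.inr ⟨hfn, hnex, ht⟩
  · rw [hBG]
    have hlen : ((pre ++ [m]).length : Int) = (pre.length : Int) + 1 := by simp
    rw [hlen]
    refine pvIsMin_mono hmain.2 ?_ ?_
    · rintro p (⟨h0, hab, hbt, fn, hf1, hf2⟩ | ⟨fn, hfn, hFO, ht⟩)
      · refine ⟨h0, hab, by omega, fn, ?_, ?_⟩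
        · rwa [pvRow_append_lt pre m p.1 h0 (by omega)]
        · rwa [pvRow_append_lt pre m p.2 (by omega) hbt]
      · obtain ⟨g0, g2, g3, -⟩ := hFO
        refine ⟨g0, by omega, by omega, fn, ?_, ?_⟩
        · rwa [pvRow_append_lt pre m p.1 g0 g2]
        · rw [ht, pvRow_append_self]
          rwa [PySem.List.mem_dedup] at hfn
    · rintro p ⟨h0, hab, hbt1, fn, hf1, hf2⟩
      by_cases hbt : p.2 < (pre.length : Int)
      · refine ⟨p, Or.inl ⟨h0, hab, hbt, fn, ?_, ?_⟩, pvLexLe_refl p⟩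
        · rwa [pvRow_append_lt pre m p.1 h0 (by omega)] at hf1
        · rwa [pvRow_append_lt pre m p.2 (by omega) hbt] at hf2
      · have hpt : p.2 = (pre.length : Int) := by omega
        rw [hpt, pvRow_append_self] at hf2
        rw [pvRow_append_lt pre m p.1 h0 (by omega)] at hf1
        obtain ⟨a0, ha0, hle⟩ := pvFirstOcc_exists h0 (by omega) hf1
        refine ⟨(a0, (pre.length : Int)), Or.inr ⟨fn, ?_, ha0, rfl⟩, ?_⟩
        · rwa [PySem.List.mem_dedup]
        · rcases eq_or_lt_of_le hle with rfl | hlt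
          · exact Or.inr ⟨rfl, by omega⟩
          · exact Or.inl hlt

theorem pvB_inv (mentors : List (List String)) :
    pvInv mentors ((PySem.List.enumerate mentors 0).foldl pvBGroup (PySem.Dict.empty, none)) := by
  induction mentors using List.reverseRecOn with
  | nil =>
    constructor
    · intro fn a
      simp [PySem.Dict.get?_empty, pvFirstOcc]
      intro h1 h2
      omega
    · exact ⟨fun _ p hp => by obtain ⟨h0, hab, hbt, -⟩ := hp; simp at hbt; omega,
        fun q hq => by cases hq⟩
  | append_singleton pre m ih =>
    rw [PySem.List.enumerate_append, List.foldl_append]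
    have : PySem.List.enumerate [m] (0 + (pre.length : Int)) = [((pre.length : Int), m)] := by
      simp [PySem.List.enumerate]
    rw [this, List.foldl_cons, List.foldl_nil]
    exact pvGroup_step pre m _ ih

theorem pvF_foldl (mentors : List (List String)) :
    mentors.foldl (fun acc m => acc ++ [m.foldl (fun cn name => cn ++ [pvFirstW name]) []]) [] = pvF mentors := by
  have h1 : ∀ m : List String, m.foldl (fun cn name => cn ++ [pvFirstW name]) [] = m.map pvFirstW := by
    intro m; exact PySem.List.foldl_append_singleton_eq_map pvFirstW m []
  calc mentors.foldl (fun acc m => acc ++ [m.foldl (fun cn name => cn ++ [pvFirstW name]) []]) []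
      = mentors.foldl (fun acc m => acc ++ [m.map pvFirstW]) [] := by
        simp only [h1]
    _ = pvF mentors := PySem.List.foldl_append_singleton_eq_map _ mentors []

-- mentors[a] mapped to first names is row a of pvF
theorem pvRow_mentors (mentors : List (List String)) (a : Int) (h0 : 0 ≤ a) (ha : a < (mentors.length : Int)) :
    (PySem.List.pyGetD mentors a []).map pvFirstW = PySem.List.pyGetD (pvF mentors) a [] := by
  rw [pvRow mentors a h0 ha, PySem.List.pyGetD_eq_getElem mentors [] h0 (by omega)]

-- ===== VERDICT (by name: the statement is the Claim_ definition above) =====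
theorem supernames_spec : Claim_equal_supernames := by
  unfold Claim_equal_supernames
  intro mentors courses _ _
  unfold Spec_supernames
  have hlenF : (pvF mentors).length = mentors.length := by simp [pvF]
  have hA : supernames mentors courses =
      (pvAPair (pvF mentors)).map (fun p => pvStrA (pvF mentors) courses p.1 p.2) := by
    rw [supernames]
    simp only [pvF_foldl]
    exact pvA_eq_pair (pvF mentors) courses
  have hAmin : pvIsMin (pvInS (pvF mentors) (mentors.length : Int)) (pvAPair (pvF mentors)) := by
    have := pvA_isMin (pvF mentors)
    rwa [hlenF] at this
  have hB := pvB_inv mentors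
  have hAB : pvAPair (pvF mentors) =
      ((PySem.List.enumerate mentors 0).foldl pvBGroup (PySem.Dict.empty, none)).2 :=
    pvIsMin_unique hAmin hB.2
  rw [hA, supernames_alt]
  rw [← hAB]
  cases hp : pvAPair (pvF mentors) with
  | none => rfl
  | some p =>
    obtain ⟨i, j⟩ := p
    have hIn := (hAmin.2 (i, j) hp).1
    obtain ⟨h0, hij, hjn, -⟩ := hIn
    simp only [Option.map_some]
    rw [pvStrA, pvInterAt]
    rw [pvRow_mentors mentors i h0 (by omega), pvRow_mentors mentors j (by omega) hjn]
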